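-- pv_equiv track=rewrite | github.com/Chun-Bae/Baekjoon | 백준/Silver/1740. 거듭제곱/거듭제곱.py | nth_sum_of_distinct_powers_of_3
-- ===== SOURCE A (Python) =====
-- def nth_sum_of_distinct_powers_of_3(N):
--     result = 0
--     power = 0
--     while N > 0:
--         if N & 1:
--             result += 3 ** power
--         N >>= 1
--         power += 1
--     return result
-- ===== SOURCE B (Python) =====
-- def nth_sum_of_distinct_powers_of_3(N):
--     if N <= 0:
--         return 0
--     return (N & 1) + 3 * nth_sum_of_distinct_powers_of_3(N >> 1)
-- ===== Notes on version B (the rewrite author's own statement) =====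
-- stated objective: simpler
-- what changed: Replaced the iterative shift/accumulate loop carrying result and power accumulators by an accumulator-free recursion on the low bit (Horner form over the binary digits).
import Mathlib
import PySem

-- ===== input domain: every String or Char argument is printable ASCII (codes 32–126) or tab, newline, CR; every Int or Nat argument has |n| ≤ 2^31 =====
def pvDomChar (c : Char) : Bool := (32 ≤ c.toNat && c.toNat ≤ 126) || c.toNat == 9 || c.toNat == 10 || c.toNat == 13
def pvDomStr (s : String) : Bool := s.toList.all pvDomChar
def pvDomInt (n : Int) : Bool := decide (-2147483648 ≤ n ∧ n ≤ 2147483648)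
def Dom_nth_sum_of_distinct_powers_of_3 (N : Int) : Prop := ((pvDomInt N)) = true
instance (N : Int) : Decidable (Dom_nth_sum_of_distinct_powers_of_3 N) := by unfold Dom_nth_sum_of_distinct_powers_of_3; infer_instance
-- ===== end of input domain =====

-- B replaces A's iterative shift/accumulate loop (result/power accumulators) by an
-- accumulator-free recursive Horner form (N&1) + 3*f(N>>1); simpler, same behaviour.

-- ===== PORT A =====
-- the while loop: state (N, result, power); `3 ** power` is ported as `3 ^ power.toNat`,
-- exact since power starts at 0 and only increments (always nonnegative).
def pvGoA (N result power : Int) : Int :=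
  if h : 0 < N then
    pvGoA (PySem.Int.floordiv N 2)
      (if PySem.Int.mod N 2 ≠ 0 then result + 3 ^ power.toNat else result)
      (power + 1)
  else result
termination_by N.toNat
decreasing_by
  rw [PySem.Int.floordiv_eq_ediv_of_pos (by omega : (0:Int) < 2)]
  omega

def nth_sum_of_distinct_powers_of_3 (N : Int) : Int := pvGoA N 0 0

-- ===== PORT B =====
def nth_sum_of_distinct_powers_of_3_alt (N : Int) : Int :=
  if h : N ≤ 0 then 0
  else PySem.Int.mod N 2 + 3 * nth_sum_of_distinct_powers_of_3_alt (PySem.Int.floordiv N 2)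
termination_by N.toNat
decreasing_by
  rw [PySem.Int.floordiv_eq_ediv_of_pos (by omega : (0:Int) < 2)]
  omega

-- ===== PRECONDITION & SPEC =====
def Spec_nth_sum_of_distinct_powers_of_3 (N : Int) (out : Int) : Prop := out = nth_sum_of_distinct_powers_of_3_alt N
instance (N : Int) (out : Int) : Decidable (Spec_nth_sum_of_distinct_powers_of_3 N out) := by unfold Spec_nth_sum_of_distinct_powers_of_3; infer_instance

-- ===== CLAIM (what is proved, stated in full; the proofs are below) =====
def Claim_equal_nth_sum_of_distinct_powers_of_3 : Prop := ∀ (N : Int), Dom_nth_sum_of_distinct_powers_of_3 N → Spec_nth_sum_of_distinct_powers_of_3 N (nth_sum_of_distinct_powers_of_3 N)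

-- ===== LEMMAS AND PROOFS =====

-- loop invariant: the loop from state (N, result, power) returns result + 3^power * B(N)
lemma pvGoA_eq (n : Nat) : ∀ (N result power : Int), N.toNat = n → 0 ≤ power →
    pvGoA N result power = result + 3 ^ power.toNat * nth_sum_of_distinct_powers_of_3_alt N := by
  induction n using Nat.strong_induction_on with
  | _ n ih =>
    intro N result power hn hp
    rw [pvGoA]
    by_cases hN : 0 < N
    · have h2 : (0:Int) < 2 := by omega
      have hfd : PySem.Int.floordiv N 2 = N / 2 := PySem.Int.floordiv_eq_ediv_of_pos h2
      have hmd : PySem.Int.mod N 2 = N % 2 := PySem.Int.mod_eq_emod_of_pos h2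
      have hlt : (PySem.Int.floordiv N 2).toNat < n := by rw [hfd]; omega
      rw [dif_pos hN,
        ih _ hlt (PySem.Int.floordiv N 2) _ (power + 1) rfl (by omega)]
      have hpt : (power + 1).toNat = power.toNat + 1 := by omega
      conv_rhs => rw [nth_sum_of_distinct_powers_of_3_alt, dif_neg (show ¬ N ≤ 0 by omega)]
      rw [hpt]
      have hm : N % 2 = 0 ∨ N % 2 = 1 := by omega
      rw [hmd]
      rcases hm with hm | hm <;> simp [hm, pow_succ] <;> ring
    · rw [dif_neg hN, nth_sum_of_distinct_powers_of_3_alt, dif_pos (by omega : N ≤ 0)]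
      ring

-- ===== VERDICT (by name: the statement is the Claim_ definition above) =====
theorem nth_sum_of_distinct_powers_of_3_spec : Claim_equal_nth_sum_of_distinct_powers_of_3 := by
  intro N _
  unfold Spec_nth_sum_of_distinct_powers_of_3 nth_sum_of_distinct_powers_of_3
  rw [pvGoA_eq N.toNat N 0 0 rfl le_rfl]
  simp
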